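-- pv_equiv track=rewrite | github.com/crosscon/baremetal-tee | MPU-version/OS/Utils/helper.py | string_to_reg_array
-- ===== SOURCE A (Python) =====
-- REGISTERS_NUMBERED_NAMES = {
-- 	'r0' : 'r0',
-- 	'r1' : 'r1',
-- 	'r2' : 'r2',
-- 	'r3' : 'r3',
-- 	'r4' : 'r4',
-- 	'r5' : 'r5',
-- 	'r6' : 'r6',
-- 	'r7' : 'r7',
-- 	'r8' : 'r8',
-- 	'r9' : 'r9',
-- 	'r10' : 'r10',
-- 	'r11' : 'r11',
-- 	'r12' : 'r12',
-- 	'r13' : 'r13',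
-- 	'r14' : 'r14',
-- 	'r15' : 'r15',
-- 	'sp' : 'r13',
-- 	'lr' : 'r14',
-- 	'pc' : 'r15',
-- 	# Old APCS register names
-- 	'a1' : 'r0',
-- 	'a2' : 'r1',
-- 	'a3' : 'r2',
-- 	'a4' : 'r3',
-- 	'v1' : 'r4',
-- 	'v2' : 'r5',
-- 	'v3' : 'r6',
-- 	'v4' : 'r7',
-- 	'v5' : 'r8',
-- 	'v6' : 'r9',
-- 	'v7' : 'r10',
-- 	'sb' : 'r9',
-- 	'sl' : 'r10',
-- 	'fp' : 'r11',
-- 	'ip' : 'r12',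
-- 	# AAPCS register names
-- 	'v8' : 'r11',
-- 	'tr' : 'r9'
-- }
--
-- def _reg_key(r):
-- 	'Return only the number of the register starting from the string of the name'
-- 	return int(numbered_name(r)[1:])
--
-- def numbered_name(r):
-- 	''' Convert register name to its numbered name using the mapping created
-- 	If the register does not exist, an assertion error is raised '''
--
-- 	assert r.strip().lower() in REGISTERS_NUMBERED_NAMES, 'Register specified does not exist'
-- 	return REGISTERS_NUMBERED_NAMES[r.lower().strip()]
--
-- def sort_reg_array(arr):
-- 	'Sort an array of registers by their number'
-- 	return sorted(arr, key=_reg_key)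
--
-- def string_to_reg_array(reg_s):
-- 	''' Convert a string of registers to an array of registers
-- 	The string can contain register ranges and single registers
--     E.g: "r0-r3, r5, r7" will be converted to ["r0", "r1", "r2", "r3", "r5", "r7"]'''
--
-- 	r_set = set()
-- 	r_list = reg_s.split(',')
-- 	for r in r_list:
-- 		if '-' in r:	# register range conversion
-- 			r_range = r.split('-')
-- 			assert len(r_range) == 2, 'Invalid register range specified'
-- 			low = numbered_name(r_range[0])
-- 			high = numbered_name(r_range[1])
-- 			low = int(low[1:])	# convert low register to integer boundry
-- 			high = int(high[1:])	# convert high register to integer boundry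
-- 			assert low <= high, 'Invalid register range specified'
-- 			for num in range(low, high+1):
-- 				r_set.add('r%s'%(num))
-- 		else:	# single register conversion
-- 			r_set.add(numbered_name(r))
-- 	numbered_list = []
-- 	for r in r_set:
-- 		numbered_list.append(numbered_name(r))
-- 	return sort_reg_array(numbered_list)
-- ===== SOURCE B (Python) =====
-- REGISTERS_NUMBERED_NAMES = {
-- 	'r0' : 'r0', 'r1' : 'r1', 'r2' : 'r2', 'r3' : 'r3', 'r4' : 'r4',
-- 	'r5' : 'r5', 'r6' : 'r6', 'r7' : 'r7', 'r8' : 'r8', 'r9' : 'r9',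
-- 	'r10' : 'r10', 'r11' : 'r11', 'r12' : 'r12', 'r13' : 'r13',
-- 	'r14' : 'r14', 'r15' : 'r15',
-- 	'sp' : 'r13', 'lr' : 'r14', 'pc' : 'r15',
-- 	'a1' : 'r0', 'a2' : 'r1', 'a3' : 'r2', 'a4' : 'r3',
-- 	'v1' : 'r4', 'v2' : 'r5', 'v3' : 'r6', 'v4' : 'r7', 'v5' : 'r8',
-- 	'v6' : 'r9', 'v7' : 'r10', 'sb' : 'r9', 'sl' : 'r10', 'fp' : 'r11',
-- 	'ip' : 'r12', 'v8' : 'r11', 'tr' : 'r9'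
-- }
--
-- def numbered_name(r):
-- 	assert r.strip().lower() in REGISTERS_NUMBERED_NAMES, 'Register specified does not exist'
-- 	return REGISTERS_NUMBERED_NAMES[r.lower().strip()]
--
-- def string_to_reg_array(reg_s):
-- 	'''Convert a register string (singles and ranges) to a sorted register
-- 	array via a 16-bit presence bitmask: no set, no sort -- a range becomes
-- 	one OR of a closed-form bit run, and the final ascending scan of the 16
-- 	possible bits emits the registers already in order.'''
-- 	mask = 0
-- 	for tok in reg_s.split(','):
-- 		if '-' in tok:
-- 			ends = tok.split('-')
-- 			assert len(ends) == 2, 'Invalid register range specified'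
-- 			low = int(numbered_name(ends[0])[1:])
-- 			high = int(numbered_name(ends[1])[1:])
-- 			assert low <= high, 'Invalid register range specified'
-- 			mask |= ((1 << (high - low + 1)) - 1) << low
-- 		else:
-- 			mask |= 1 << int(numbered_name(tok)[1:])
-- 	return ['r%d' % n for n in range(16) if mask >> n & 1]
-- ===== Notes on version B (the rewrite author's own statement) =====
-- stated objective: alternative
-- what changed: B replaces A's string set plus rebuild-and-sort pipeline with a 16-bit presence bitmask: each range is one OR of a closed-form bit run ((1<<(high-low+1))-1)<<low instead of an inner insertion loop, and the final ascending scan of the 16 bits emits the registers already sorted, so the set, the second numbered_name pass and the key-based sort all disappear.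
import Mathlib
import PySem

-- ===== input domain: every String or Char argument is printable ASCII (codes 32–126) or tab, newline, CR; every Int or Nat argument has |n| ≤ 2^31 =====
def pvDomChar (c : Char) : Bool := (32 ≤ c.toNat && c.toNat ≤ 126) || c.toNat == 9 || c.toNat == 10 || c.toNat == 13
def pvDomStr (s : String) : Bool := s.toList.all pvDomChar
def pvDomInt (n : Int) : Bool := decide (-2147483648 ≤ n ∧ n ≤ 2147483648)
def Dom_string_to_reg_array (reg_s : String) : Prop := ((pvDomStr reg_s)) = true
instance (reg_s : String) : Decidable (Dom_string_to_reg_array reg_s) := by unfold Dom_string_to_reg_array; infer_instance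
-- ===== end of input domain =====

-- B replaces A's string set + rebuild + key-sort pipeline with a 16-bit presence bitmask:
-- a range is one OR of a closed-form bit run, and an ascending scan of the 16 bits emits
-- the registers already sorted (objective: alternative).

-- ===== PORT A =====
-- the module-level dict literal REGISTERS_NUMBERED_NAMES (distinct keys, insertion order)
def REGS : PySem.Dict String String := PySem.Dict.mk
  [("r0","r0"),("r1","r1"),("r2","r2"),("r3","r3"),("r4","r4"),("r5","r5"),
   ("r6","r6"),("r7","r7"),("r8","r8"),("r9","r9"),("r10","r10"),("r11","r11"),
   ("r12","r12"),("r13","r13"),("r14","r14"),("r15","r15"),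
   ("sp","r13"),("lr","r14"),("pc","r15"),
   ("a1","r0"),("a2","r1"),("a3","r2"),("a4","r3"),
   ("v1","r4"),("v2","r5"),("v3","r6"),("v4","r7"),("v5","r8"),
   ("v6","r9"),("v7","r10"),("sb","r9"),("sl","r10"),("fp","r11"),
   ("ip","r12"),("v8","r11"),("tr","r9")]

-- numbered_name: none = AssertionError
def numberedName? (r : String) : Option String :=
  if REGS.contains (PySem.Str.lower (PySem.Str.strip r)) then
    REGS.get? (PySem.Str.strip (PySem.Str.lower r))
  else none

-- int(numbered_name(t)[1:])  (_reg_key's body in A, and B's per-token conversion)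
def regNum? (t : String) : Option Int :=
  (numberedName? t).bind (fun n => PySem.Int.ofChars? (PySem.List.slice n.toList (some 1) none))

-- _reg_key, totalised with 0 (never reached on A's set elements, which are valid names)
def regKey (r : String) : Int := (regNum? r).getD 0

-- 'r%s' % num / 'r%d' % n
def fmtReg (n : Int) : String := String.ofList ('r' :: PySem.Int.toChars n)

-- body of A's token loop (none = an assertion raised)
def stepA (acc : Option (PySem.Set String)) (r : String) : Option (PySem.Set String) :=
  acc.bind (fun s =>
    if PySem.Str.isIn "-" r then
      let r_range := (PySem.Str.split? r "-").getD []
      if r_range.length = 2 then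
        (numberedName? (r_range[0]!)).bind (fun low0 =>
        (numberedName? (r_range[1]!)).bind (fun high0 =>
        (PySem.Int.ofChars? (PySem.List.slice low0.toList (some 1) none)).bind (fun low =>
        (PySem.Int.ofChars? (PySem.List.slice high0.toList (some 1) none)).bind (fun high =>
        if low ≤ high then
          some ((PySem.List.pyRange low (high+1) 1).foldl
                  (fun s2 num => PySem.Set.add s2 (fmtReg num)) s)
        else none))))
      else none
    else (numberedName? r).map (fun n => PySem.Set.add s n))

def string_to_reg_array (reg_s : String) : List String :=
  let r_list := (PySem.Str.split? reg_s ",").getD []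
  match r_list.foldl stepA (some ([] : PySem.Set String)) with
  | none => []        -- an assertion raised; excluded by Pre_
  | some rset =>
    -- numbered_list rebuild loop, then sort_reg_array
    match rset.foldl (fun acc r => acc.bind (fun l => (numberedName? r).map (fun n => l ++ [n])))
            (some ([] : List String)) with
    | none => []      -- an assertion raised; excluded by Pre_
    | some numbered => PySem.List.sorted numbered regKey false

-- ===== PORT B =====
-- body of B's token loop over the bitmask (none = an assertion raised).
-- mask is a Python int that stays nonnegative (it starts at 0 and only ORs in nonnegative
-- runs), so Nat is exact; the shift amounts high-low+1 and low are the nonnegative register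
-- numbers numbered_name yields, so .toNat is exact.
def stepB (acc : Option Nat) (tok : String) : Option Nat :=
  acc.bind (fun mask =>
    if PySem.Str.isIn "-" tok then
      let ends := (PySem.Str.split? tok "-").getD []
      if ends.length = 2 then
        (regNum? (ends[0]!)).bind (fun low =>
        (regNum? (ends[1]!)).bind (fun high =>
        if low ≤ high then
          some (mask ||| (((1 <<< (high - low + 1).toNat) - 1) <<< low.toNat))
        else none))
      else none
    else (regNum? tok).map (fun n => mask ||| (1 <<< n.toNat)))

def string_to_reg_array_alt (reg_s : String) : List String :=
  match ((PySem.Str.split? reg_s ",").getD []).foldl stepB (some (0 : Nat)) with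
  | none => []        -- an assertion raised; excluded by Pre_
  | some mask =>
    -- ['r%d' % n for n in range(16) if mask >> n & 1]
    ((PySem.List.pyRange 0 16 1).filter
        (fun n => (mask >>> n.toNat) &&& 1 == 1)).map (fun n => fmtReg n)

-- ===== PRECONDITION & SPEC =====
-- token validity checks used only by Pre_
def validName (t : String) : Bool := REGS.contains (PySem.Str.lower (PySem.Str.strip t))
def validTok (t : String) : Bool :=
  if PySem.Str.isIn "-" t then
    match (PySem.Str.split? t "-").getD [] with
    | [a, b] => validName a && validName b && decide (regKey a ≤ regKey b)
    | _ => false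
  else validName t

-- Pre_ excludes exactly the inputs where A raises AssertionError: a token naming no register,
-- a token splitting into more than two range endpoints, or a range whose low bound exceeds its high bound.
def Pre_string_to_reg_array (reg_s : String) : Prop :=
  ∀ t ∈ (PySem.Str.split? reg_s ",").getD [], validTok t = true
instance (reg_s : String) : Decidable (Pre_string_to_reg_array reg_s) := by
  unfold Pre_string_to_reg_array; infer_instance

def pvWitness_string_to_reg_array : String := "r0-r3, r5, sp"

def Spec_string_to_reg_array (reg_s : String) (out : List String) : Prop :=
  out = string_to_reg_array_alt reg_s
instance (reg_s : String) (out : List String) : Decidable (Spec_string_to_reg_array reg_s out) := by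
  unfold Spec_string_to_reg_array; infer_instance

-- ===== CLAIM (what is proved, stated in full; the proofs are below) =====
def Claim_equal_string_to_reg_array : Prop :=
  ∀ (reg_s : String), Dom_string_to_reg_array reg_s → Pre_string_to_reg_array reg_s →
    Spec_string_to_reg_array reg_s (string_to_reg_array reg_s)

-- ===== LEMMAS AND PROOFS =====
-- whitespace test is invariant under lowercasing
lemma isspace_lowerChar (c : Char) :
    PySem.Chars.isspace (PySem.Chars.lowerChar c) = PySem.Chars.isspace c := by
  unfold PySem.Chars.lowerChar
  by_cases h : PySem.Chars.isupper c = true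
  · simp only [h, if_pos]
    unfold PySem.Chars.isupper at h
    have hc : 65 ≤ c.toNat ∧ c.toNat ≤ 90 := by
      simp only [Bool.and_eq_true, decide_eq_true_eq] at h
      exact ⟨h.1, h.2⟩
    have hv : (Char.ofNat (c.toNat + 32)).toNat = c.toNat + 32 := by
      have hvc : (c.toNat + 32).isValidChar := Or.inl (by omega)
      rw [Char.toNat_ofNat, if_pos hvc]
    unfold PySem.Chars.isspace
    rw [Bool.eq_iff_iff]
    simp only [hv, Bool.or_eq_true, Bool.and_eq_true, decide_eq_true_eq]
    omega
  · simp [h]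

lemma dropWhile_space_lower (l : List Char) :
    List.dropWhile PySem.Chars.isspace (l.map PySem.Chars.lowerChar)
      = (List.dropWhile PySem.Chars.isspace l).map PySem.Chars.lowerChar := by
  induction l with
  | nil => rfl
  | cons c l ih =>
    simp only [List.map_cons, List.dropWhile_cons, isspace_lowerChar]
    by_cases h : PySem.Chars.isspace c = true
    · simp [h, ih]
    · simp [h]

lemma strip_lower_comm (t : String) :
    PySem.Str.strip (PySem.Str.lower t) = PySem.Str.lower (PySem.Str.strip t) := by
  simp only [PySem.Str.strip, PySem.Str.lower, PySem.Chars.strip, PySem.Chars.lower,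
    PySem.Chars.lstrip, PySem.Chars.rstrip, String.toList_ofList]
  rw [dropWhile_space_lower, ← List.map_reverse, dropWhile_space_lower, List.map_reverse]

-- every value stored in REGS is fmtReg n for some 0 ≤ n ≤ 15 whose digits parse back to n
set_option maxRecDepth 8192 in
lemma regs_values_ok :
    REGS.values.all (fun v =>
      (PySem.Int.ofChars? (PySem.List.slice v.toList (some 1) none)).elim false
        (fun n => decide (0 ≤ n) && decide (n ≤ 15) && (v == fmtReg n))) = true := by
  decide

-- r0..r15 are fixpoints of numbered_name and parse back to their number
set_option maxRecDepth 8192 in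
lemma fmt_range : ∀ m : Nat, m < 16 →
    numberedName? (fmtReg ((m : Int))) = some (fmtReg ((m : Int))) ∧
    regNum? (fmtReg ((m : Int))) = some ((m : Int)) := by
  decide

lemma fmt_name {n : Int} (h0 : 0 ≤ n) (h15 : n ≤ 15) :
    numberedName? (fmtReg n) = some (fmtReg n) ∧ regNum? (fmtReg n) = some n := by
  obtain ⟨m, rfl⟩ := Int.eq_ofNat_of_zero_le h0
  exact fmt_range m (by omega)

lemma regKey_fmt {n : Int} (h0 : 0 ≤ n) (h15 : n ≤ 15) : regKey (fmtReg n) = n := by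
  unfold regKey; rw [(fmt_name h0 h15).2]; rfl

lemma fmt_inj {m n : Int} (hm0 : 0 ≤ m) (hm15 : m ≤ 15) (hn0 : 0 ≤ n) (hn15 : n ≤ 15)
    (h : fmtReg m = fmtReg n) : m = n := by
  have := (fmt_name hm0 hm15).2
  rw [h, (fmt_name hn0 hn15).2] at this
  exact (Option.some_injective _ this).symm

lemma validName_spec {t : String} (h : validName t = true) :
    ∃ n : Int, 0 ≤ n ∧ n ≤ 15 ∧ numberedName? t = some (fmtReg n) ∧
      regNum? t = some n ∧ regKey t = n := by
  unfold validName at h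
  have hkey := strip_lower_comm t
  have hnn : numberedName? t = REGS.get? (PySem.Str.lower (PySem.Str.strip t)) := by
    unfold numberedName?; rw [if_pos h, hkey]
  have hsome : (REGS.get? (PySem.Str.lower (PySem.Str.strip t))).isSome = true := by
    rw [← PySem.Dict.contains_eq_isSome_get?]; exact h
  obtain ⟨v, hv⟩ := Option.isSome_iff_exists.mp hsome
  have hmem : v ∈ REGS.values := by
    have : (PySem.Str.lower (PySem.Str.strip t), v) ∈ REGS.items :=
      PySem.Dict.mem_items_of_get?_eq_some _ hv
    simp only [PySem.Dict.values]
    exact List.mem_map.mpr ⟨_, this, rfl⟩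
  have hval := List.all_eq_true.mp regs_values_ok v hmem
  cases hparse : PySem.Int.ofChars? (PySem.List.slice v.toList (some 1) none) with
  | none => rw [hparse] at hval; simp at hval
  | some n =>
    rw [hparse] at hval
    simp only [Option.elim, Bool.and_eq_true, decide_eq_true_eq, beq_iff_eq] at hval
    obtain ⟨⟨h0, h15⟩, hveq⟩ := hval
    refine ⟨n, h0, h15, ?_, ?_, ?_⟩
    · rw [hnn, hv, hveq]
    · unfold regNum?; rw [hnn, hv]; simpa using hparse
    · unfold regKey regNum?; rw [hnn, hv]; simp [hparse]

-- loop invariant: A's string set holds exactly fmtReg of the bits set in B's mask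
def RegInv (sA : PySem.Set String) (mask : Nat) : Prop :=
  sA.Nodup ∧
  ∀ s, s ∈ sA ↔ ∃ m : Nat, m < 16 ∧ mask.testBit m = true ∧ s = fmtReg ((m : Int))

lemma add_inv {sA mask} (h : RegInv sA mask) {n : Int} (h0 : 0 ≤ n) (h15 : n ≤ 15) :
    RegInv (PySem.Set.add sA (fmtReg n)) (mask ||| (1 <<< n.toNat)) := by
  obtain ⟨hnd, hmem⟩ := h
  refine ⟨PySem.Set.nodup_add _ _ hnd, fun s => ?_⟩
  rw [PySem.Set.mem_add, hmem]
  constructor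
  · rintro (⟨m, hm, hb, rfl⟩ | rfl)
    · exact ⟨m, hm, by simp [Nat.testBit_or, hb], rfl⟩
    · refine ⟨n.toNat, by omega, ?_, by rw [Int.toNat_of_nonneg h0]⟩
      simp [Nat.testBit_or, Nat.one_shiftLeft]
  · rintro ⟨m, hm, hb, rfl⟩
    rw [Nat.testBit_or, Nat.one_shiftLeft, Nat.testBit_two_pow] at hb
    rcases Bool.or_eq_true_iff.mp hb with hb | hb
    · exact Or.inl ⟨m, hm, hb, rfl⟩
    · right
      have : n.toNat = m := by simpa using hb
      rw [← this, Int.toNat_of_nonneg h0]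

lemma run_inv {sA mask} (h : RegInv sA mask) {low high : Int}
    (hl0 : 0 ≤ low) (hle : low ≤ high) (hh15 : high ≤ 15) :
    RegInv ((PySem.List.pyRange low (high+1) 1).foldl
              (fun s2 num => PySem.Set.add s2 (fmtReg num)) sA)
           (mask ||| (((1 <<< (high - low + 1).toNat) - 1) <<< low.toNat)) := by
  obtain ⟨hnd, hmem⟩ := h
  constructor
  · rw [← PySem.Set.update_map_eq_foldl_add]
    exact PySem.Set.nodup_update _ _ hnd
  · intro s
    rw [PySem.Set.mem_foldl_add]
    have hrun : ∀ m : Nat,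
        ((((1 <<< (high - low + 1).toNat) - 1) <<< low.toNat).testBit m = true)
          ↔ (low ≤ (m : Int) ∧ (m : Int) ≤ high) := by
      intro m
      rw [Nat.testBit_shiftLeft, Nat.one_shiftLeft, Nat.testBit_two_pow_sub_one]
      simp only [Bool.and_eq_true, decide_eq_true_eq]
      omega
    constructor
    · rintro (hs | ⟨num, hnum, rfl⟩)
      · obtain ⟨m, hm, hb, rfl⟩ := (hmem _).mp hs
        exact ⟨m, hm, by simp [Nat.testBit_or, hb], rfl⟩
      · obtain ⟨h1, h2⟩ := PySem.List.mem_pyRange_one.mp hnum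
        have hbit : ((((1 <<< (high - low + 1).toNat) - 1) <<< low.toNat).testBit num.toNat)
            = true := (hrun num.toNat).mpr (by rw [Int.toNat_of_nonneg (by omega)]; omega)
        refine ⟨num.toNat, by omega, ?_, by rw [Int.toNat_of_nonneg (by omega)]⟩
        rw [Nat.testBit_or, hbit]
        simp
    · rintro ⟨m, hm, hb, rfl⟩
      rw [Nat.testBit_or, Bool.or_eq_true_iff] at hb
      rcases hb with hb | hb
      · exact Or.inl ((hmem _).mpr ⟨m, hm, hb, rfl⟩)
      · obtain ⟨h1, h2⟩ := (hrun m).mp hb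
        exact Or.inr ⟨(m : Int), PySem.List.mem_pyRange_one.mpr ⟨h1, by omega⟩, rfl⟩

lemma step_inv {t : String} (ht : validTok t = true) {sA mask} (h : RegInv sA mask) :
    ∃ sA' mask', stepA (some sA) t = some sA' ∧ stepB (some mask) t = some mask' ∧
      RegInv sA' mask' := by
  unfold validTok at ht
  by_cases hd : PySem.Str.isIn "-" t = true
  · rw [if_pos hd] at ht
    cases hsplit : (PySem.Str.split? t "-").getD [] with
    | nil => rw [hsplit] at ht; simp at ht
    | cons a rest =>
      cases rest with
      | nil => rw [hsplit] at ht; simp at ht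
      | cons b rest2 =>
        cases rest2 with
        | cons c rest3 => rw [hsplit] at ht; simp at ht
        | nil =>
          rw [hsplit] at ht
          simp only [Bool.and_eq_true, decide_eq_true_eq] at ht
          obtain ⟨⟨hva, hvb⟩, hle⟩ := ht
          obtain ⟨na, ha0, ha15, hna, hra, hnna⟩ := validName_spec hva
          obtain ⟨nb, hb0, hb15, hnb, hrb, hnnb⟩ := validName_spec hvb
          rw [hnna, hnnb] at hle
          have hpa : PySem.Int.ofChars? (PySem.List.slice (fmtReg na).toList (some 1) none)
              = some na := by
            have := hra; unfold regNum? at this; rw [hna] at this; simpa using this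
          have hpb : PySem.Int.ofChars? (PySem.List.slice (fmtReg nb).toList (some 1) none)
              = some nb := by
            have := hrb; unfold regNum? at this; rw [hnb] at this; simpa using this
          refine ⟨_, _, ?_, ?_, run_inv h ha0 hle hb15⟩
          · unfold stepA
            simp only [Option.bind_some, hd, if_pos, hsplit]
            simp [hna, hnb, hpa, hpb, hle]
          · unfold stepB
            simp only [Option.bind_some, hd, if_pos, hsplit]
            simp [hra, hrb, hle]
  · rw [if_neg hd] at ht
    obtain ⟨n, h0, h15, hn, hr, _⟩ := validName_spec ht
    refine ⟨_, _, ?_, ?_, add_inv h h0 h15⟩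
    · unfold stepA
      simp only [Option.bind_some]
      rw [if_neg hd, hn]; rfl
    · unfold stepB
      simp only [Option.bind_some]
      rw [if_neg hd, hr]; rfl

lemma fold_inv (toks : List String) (h : ∀ t ∈ toks, validTok t = true) :
    ∀ sA mask, RegInv sA mask →
      ∃ sA' mask', toks.foldl stepA (some sA) = some sA' ∧
        toks.foldl stepB (some mask) = some mask' ∧ RegInv sA' mask' := by
  induction toks with
  | nil => intro sA mask hi; exact ⟨sA, mask, rfl, rfl, hi⟩
  | cons t toks ih =>
    intro sA mask hi
    obtain ⟨sA1, m1, hA1, hB1, hi1⟩ := step_inv (h t List.mem_cons_self) hi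
    obtain ⟨sA', m', hA', hB', hi'⟩ := ih (fun u hu => h u (List.mem_cons_of_mem _ hu)) sA1 m1 hi1
    exact ⟨sA', m', by simpa [hA1] using hA', by simpa [hB1] using hB', hi'⟩

lemma rebuild_eq (l : List String) (h : ∀ r ∈ l, numberedName? r = some r) :
    ∀ acc : List String,
      l.foldl (fun acc r => acc.bind (fun l2 => (numberedName? r).map (fun n => l2 ++ [n])))
        (some acc) = some (acc ++ l) := by
  induction l with
  | nil => intro acc; simp
  | cons r l ih =>
    intro acc
    simp only [List.foldl_cons, Option.bind_some, h r List.mem_cons_self, Option.map_some]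
    rw [ih (fun u hu => h u (List.mem_cons_of_mem _ hu))]
    simp

-- the filter condition 'mask >> n & 1' is the n-th bit
lemma cond_eq_testBit (mask : Nat) (n : Nat) :
    (((mask >>> n) &&& 1 == 1) = true) ↔ mask.testBit n = true := by
  rw [Nat.and_one_is_mod, Nat.shiftRight_eq_div_pow, Nat.testBit_eq_decide_div_mod_eq]
  simp

-- sorting A's set equals B's ascending bit scan
lemma sort_eq_scan (sA : PySem.Set String) (mask : Nat) (h : RegInv sA mask) :
    PySem.List.sorted sA regKey false
      = ((PySem.List.pyRange 0 16 1).filter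
          (fun n => (mask >>> n.toNat) &&& 1 == 1)).map (fun n => fmtReg n) := by
  obtain ⟨hnd, hmem⟩ := h
  have hfb : ∀ n ∈ (PySem.List.pyRange 0 16 1).filter
      (fun n => (mask >>> n.toNat) &&& 1 == 1), 0 ≤ n ∧ n < 16 := by
    intro n hn
    have := PySem.List.mem_pyRange_one.mp (List.mem_of_mem_filter hn)
    omega
  apply PySem.List.sorted_eq_of_perm_of_pairwise_lt
  · -- the scan is a permutation of sA: both Nodup with the same members
    have hndB : (((PySem.List.pyRange 0 16 1).filter
        (fun n => (mask >>> n.toNat) &&& 1 == 1)).map (fun n => fmtReg n)).Nodup := by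
      refine ((PySem.List.nodup_pyRange_one _ _).filter _).map_on ?_
      intro a ha b hb hab
      obtain ⟨ha0, ha16⟩ := hfb a ha
      obtain ⟨hb0, hb16⟩ := hfb b hb
      exact fmt_inj ha0 (by omega) hb0 (by omega) hab
    rw [List.perm_ext_iff_of_nodup hndB hnd]
    intro s
    rw [hmem, List.mem_map]
    constructor
    · rintro ⟨n, hn, rfl⟩
      obtain ⟨h0, h16⟩ := hfb n hn
      have hc := List.of_mem_filter hn
      refine ⟨n.toNat, by omega, (cond_eq_testBit mask n.toNat).mp hc, by
        rw [Int.toNat_of_nonneg h0]⟩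
    · rintro ⟨m, hm, hb, rfl⟩
      refine ⟨(m : Int), List.mem_filter.mpr ⟨PySem.List.mem_pyRange_one.mpr
        ⟨by omega, by omega⟩, ?_⟩, rfl⟩
      exact (cond_eq_testBit mask m).mpr (by simpa using hb)
  · -- the scan is strictly increasing in regKey
    rw [List.pairwise_map]
    have : ((PySem.List.pyRange 0 16 1).filter
        (fun n => (mask >>> n.toNat) &&& 1 == 1)).Pairwise (· < ·) :=
      (PySem.List.pairwise_lt_pyRange_one _ _).filter _
    refine this.imp_of_mem ?_
    intro a b ha hb hab
    obtain ⟨ha0, ha16⟩ := hfb a ha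
    obtain ⟨hb0, hb16⟩ := hfb b hb
    rw [regKey_fmt ha0 (by omega), regKey_fmt hb0 (by omega)]
    exact hab

-- ===== VERDICT (by name: the statement is the Claim_ definition above) =====
theorem string_to_reg_array_spec : Claim_equal_string_to_reg_array := by
  intro reg_s _hdom hpre
  unfold Spec_string_to_reg_array string_to_reg_array string_to_reg_array_alt
  have hinv0 : RegInv ([] : PySem.Set String) 0 :=
    ⟨List.nodup_nil, by simp⟩
  obtain ⟨sA, mask, hA, hB, hinv⟩ := fold_inv _ hpre _ _ hinv0
  simp only [hA, hB]
  have hfix : ∀ r ∈ sA, numberedName? r = some r := by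
    intro r hr
    obtain ⟨m, hm, _, rfl⟩ := (hinv.2 r).mp hr
    exact (fmt_name (by omega) (by exact_mod_cast (by omega : (m : Int) ≤ 15))).1
  rw [rebuild_eq sA hfix []]
  simp only [List.nil_append]
  exact sort_eq_scan sA mask hinv
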